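-- pv_equiv track=rewrite | github.com/monprin/CribCounter | cribCounter.py | scoreFlushes
-- ===== SOURCE A (Python) =====
-- def getCard(num):
-- 	# Get the card number (1-13)
-- 	return (((num - 1) % 13) + 1)
--
-- def getSuitNum(num):
-- 	return int((num-1)/13)
--
-- def scoreFlushes(hand):
-- 	suits = []
-- 	suits.append([])
-- 	suits.append([])
-- 	suits.append([])
-- 	suits.append([])
-- 	score = 0
--
-- 	drawHand = hand[:4]
-- 	cut = hand[-1]
-- 	for card in drawHand:
-- 		suits[getSuitNum(card)].append(getCard(card))
--
-- 	i = 0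
-- 	while(i < 4):
-- 		count = len(suits[i])
-- 		if(count >= 4):
-- 			score += count
-- 			break
-- 		i += 1
--
-- 	# If the cut matches suit, add 1 to score
-- 	if((score > 0) and (getSuitNum(cut) == i)):
-- 		score += 1
-- 	return score
-- ===== SOURCE B (Python) =====
-- def getSuitNum(num):
-- 	return int((num-1)/13)
--
-- def scoreFlushes(hand):
-- 	drawHand = hand[:4]
-- 	cut = hand[-1]
-- 	suitsSeen = {getSuitNum(card) for card in drawHand}
-- 	if len(drawHand) == 4 and len(suitsSeen) == 1:
-- 		return 5 if getSuitNum(cut) in suitsSeen else 4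
-- 	return 0
-- ===== Notes on version B (the rewrite author's own statement) =====
-- stated objective: simpler
-- what changed: B drops the four suit-bucket lists and the while-scan: it computes the set of suit numbers of the 4-card draw hand and scores by 'exactly 4 cards, one distinct suit', comparing the cut's suit against that suit directly.
-- intended difference: On hands whose first four cards land in one bucket only via Python's negative list-index wraparound (some draw card with negative suit number, i.e. an invalid card below 1..52), A scores a 'flush' by the wrapped bucket index (e.g. scoreFlushes([-12,-12,-12,-12,-12]) = 4) while B scores by the actual suit numbers (5 there); B's value is intended because suit -1 is not the same suit as suit 3. — e.g. on scoreFlushes([-12, -12, -12, -12, -12]): A returns 4, B returns 5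
import Mathlib
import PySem

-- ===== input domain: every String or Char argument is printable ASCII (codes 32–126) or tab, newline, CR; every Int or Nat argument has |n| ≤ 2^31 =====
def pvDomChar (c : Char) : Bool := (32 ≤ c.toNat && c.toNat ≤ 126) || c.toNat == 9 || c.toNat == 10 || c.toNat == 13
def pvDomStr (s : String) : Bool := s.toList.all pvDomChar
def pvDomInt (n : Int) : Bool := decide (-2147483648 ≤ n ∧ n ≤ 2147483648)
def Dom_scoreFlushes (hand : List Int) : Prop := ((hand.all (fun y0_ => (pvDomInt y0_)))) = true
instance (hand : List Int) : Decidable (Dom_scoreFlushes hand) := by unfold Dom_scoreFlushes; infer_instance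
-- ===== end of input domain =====

-- B replaces A's four suit-bucket lists and while-scan by a set of the draw hand's suit
-- numbers ('exactly 4 cards of one suit'); objective: simpler. Where A's bucket indexing
-- only works via Python's negative-index wraparound (invalid cards of negative suit), B
-- scores by the suits themselves — see D_scoreFlushes.

-- ===== PORT A =====
-- getCard: (((num - 1) % 13) + 1), Python %
def getCard (num : Int) : Int := PySem.Int.mod (num - 1) 13 + 1

-- getSuitNum: int((num-1)/13). Exact on Dom (|num| ≤ 2^31): the float quotient has
-- magnitude ≤ 1.7e8, so its ulp is far below 1/13 and int() truncation toward zero of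
-- the correctly-rounded float quotient equals truncating integer division (Int.tdiv).
def getSuitNum (num : Int) : Int := (num - 1).tdiv 13

-- suits[j].append(x): Python resolves a negative index from the end; out-of-range j
-- raises IndexError (those inputs are excluded by Pre_; the port leaves the list unchanged there).
def pyBucketSet (s : List (List Int)) (j : Int) (x : Int) : List (List Int) :=
  let k := if j < 0 then j + s.length else j
  if 0 ≤ k ∧ k < s.length then s.set k.toNat (s.getD k.toNat [] ++ [x]) else s

-- the 'while(i < 4)' loop; structural fuel 4 - i (the loop body runs at most 4 times),
-- returns (score, i) at exit or break
def whileA (suits : List (List Int)) (score : Int) (i : Int) : Nat → Int × Int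
  | 0 => (score, i)
  | fuel + 1 =>
    if i < 4 then
      let count : Int := (suits.getD i.toNat []).length
      if count ≥ 4 then (score + count, i) else whileA suits score (i + 1) fuel
    else (score, i)

def scoreFlushes (hand : List Int) : Int :=
  let suits : List (List Int) := []
  let suits := suits ++ [[]]
  let suits := suits ++ [[]]
  let suits := suits ++ [[]]
  let suits := suits ++ [[]]
  let score : Int := 0
  let drawHand := PySem.List.slice hand none (some 4)
  let cut := (PySem.List.pyGet? hand (-1)).getD 0   -- hand[-1]; none = IndexError, excluded by Pre_
  let suits := drawHand.foldl (fun s card => pyBucketSet s (getSuitNum card) (getCard card)) suits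
  let r := whileA suits score 0 4
  if r.1 > 0 ∧ getSuitNum cut = r.2 then r.1 + 1 else r.1

-- ===== PORT B =====
def scoreFlushes_alt (hand : List Int) : Int :=
  let drawHand := PySem.List.slice hand none (some 4)
  let cut := (PySem.List.pyGet? hand (-1)).getD 0   -- hand[-1]; none = IndexError, excluded by Pre_
  let suitsSeen := PySem.Set.ofList (drawHand.map getSuitNum)
  if drawHand.length = 4 ∧ suitsSeen.length = 1 then
    if PySem.Set.contains suitsSeen (getSuitNum cut) then 5 else 4
  else 0

-- ===== PRECONDITION & SPEC =====
-- a card c has suit number s (s = trunc((c-1)/13)) iff c lies in s's 13-card interval;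
-- stated as intervals so the condition is read off the input without any division
def pvHasSuit (c s : Int) : Bool :=
  (decide (0 < s) && decide (13 * s + 1 ≤ c) && decide (c ≤ 13 * s + 13)) ||
  (decide (s = 0) && decide (-11 ≤ c) && decide (c ≤ 13)) ||
  (decide (s < 0) && decide (13 * s - 11 ≤ c) && decide (c ≤ 13 * s + 1))
-- A raises IndexError on the empty hand (hand[-1]) and whenever one of the first four
-- cards has suit number outside -4..3; exactly those inputs are excluded.
def Pre_scoreFlushes (hand : List Int) : Prop :=
  hand ≠ [] ∧
  ∀ c ∈ hand.take 4, ∃ s ∈ ([-4, -3, -2, -1, 0, 1, 2, 3] : List Int), pvHasSuit c s = true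

instance (hand : List Int) : Decidable (Pre_scoreFlushes hand) := by
  unfold Pre_scoreFlushes; infer_instance

def pvWitness_scoreFlushes : List Int := [1, 2, 3, 4, 5]

-- On hands whose first four cards land in one bucket only via Python's negative
-- list-index wraparound (some draw card of negative suit number, i.e. an invalid card
-- below 1..52), A scores a 'flush' by the wrapped bucket index while B scores by the
-- actual suit numbers; B's value is intended: suit -1 is not the same suit as suit 3.
def D_scoreFlushes (hand : List Int) : Prop :=
  4 ≤ hand.length ∧
  ∃ bk ∈ ([0, 1, 2, 3] : List Int),
    (∀ c ∈ hand.take 4, pvHasSuit c bk = true ∨ pvHasSuit c (bk - 4) = true) ∧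
    (((∃ c ∈ hand.take 4, pvHasSuit c bk = true) ∧ (∃ c ∈ hand.take 4, pvHasSuit c (bk - 4) = true)) ∨
     ((∀ c ∈ hand.take 4, pvHasSuit c (bk - 4) = true) ∧
      (pvHasSuit (hand.getD (hand.length - 1) 0) (bk - 4) = true ∨
       pvHasSuit (hand.getD (hand.length - 1) 0) bk = true)))

instance (hand : List Int) : Decidable (D_scoreFlushes hand) := by
  unfold D_scoreFlushes; infer_instance

def Spec_scoreFlushes (hand : List Int) (out : Int) : Prop :=
  ¬ D_scoreFlushes hand → out = scoreFlushes_alt hand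

instance (hand : List Int) (out : Int) : Decidable (Spec_scoreFlushes hand out) := by
  unfold Spec_scoreFlushes; infer_instance

def pvDiffWitness_scoreFlushes : List Int := [-12, -12, -12, -12, -12]
def pvDiffWitnessOut_scoreFlushes : Int × Int := (4, 5)

-- ===== CLAIM (what is proved, stated in full; the proofs are below) =====
def Claim_unchanged_scoreFlushes : Prop :=
  ∀ (hand : List Int), Dom_scoreFlushes hand → Pre_scoreFlushes hand →
    Spec_scoreFlushes hand (scoreFlushes hand)

def Claim_changed_scoreFlushes : Prop :=
  Dom_scoreFlushes (pvDiffWitness_scoreFlushes) ∧ Pre_scoreFlushes (pvDiffWitness_scoreFlushes) ∧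
  D_scoreFlushes (pvDiffWitness_scoreFlushes) ∧
  scoreFlushes (pvDiffWitness_scoreFlushes) = pvDiffWitnessOut_scoreFlushes.1 ∧
  scoreFlushes_alt (pvDiffWitness_scoreFlushes) = pvDiffWitnessOut_scoreFlushes.2 ∧
  pvDiffWitnessOut_scoreFlushes.1 ≠ pvDiffWitnessOut_scoreFlushes.2

def Claim_exact_scoreFlushes : Prop :=
  ∀ (hand : List Int), Dom_scoreFlushes hand → Pre_scoreFlushes hand →
    D_scoreFlushes hand → scoreFlushes hand ≠ scoreFlushes_alt hand

-- ===== LEMMAS AND PROOFS =====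

-- proof-layer view of a card: its suit number (trunc division, = the port's getSuitNum)
-- and the bucket index its suit resolves to in A's 4-element bucket list
def pvSuit (c : Int) : Int := (c - 1).tdiv 13
def pvBucket (c : Int) : Int := if pvSuit c < 0 then pvSuit c + 4 else pvSuit c

theorem pvHasSuit_iff (c s : Int) : pvHasSuit c s = true ↔ pvSuit c = s := by
  unfold pvHasSuit pvSuit
  simp only [Bool.or_eq_true, Bool.and_eq_true, decide_eq_true_eq]
  rcases le_or_gt 0 (c - 1) with h | h
  · rw [Int.tdiv_eq_ediv_of_nonneg h]
    omega
  · rw [show (c - 1).tdiv 13 = -(-(c - 1) / 13) from by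
      rw [← Int.neg_tdiv_neg, Int.tdiv_eq_ediv_of_nonneg (by omega)]; norm_num]
    omega

theorem hs_or (x bk : Int) (_hx : -4 ≤ pvSuit x ∧ pvSuit x ≤ 3) (hb : pvBucket x = bk) :
    pvSuit x = bk ∨ pvSuit x = bk - 4 := by
  unfold pvBucket at hb; split_ifs at hb <;> omega

theorem bucket_of_suit (x bk : Int) (h0 : 0 ≤ bk) (h3 : bk ≤ 3)
    (h : pvSuit x = bk ∨ pvSuit x = bk - 4) : pvBucket x = bk := by
  unfold pvBucket; split_ifs <;> omega

theorem pre_range (c : Int)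
    (h : ∃ s ∈ ([-4, -3, -2, -1, 0, 1, 2, 3] : List Int), pvHasSuit c s = true) :
    -4 ≤ pvSuit c ∧ pvSuit c ≤ 3 := by
  obtain ⟨sv, hmem, hs⟩ := h
  rw [pvHasSuit_iff] at hs
  simp only [List.mem_cons, List.not_mem_nil, or_false] at hmem
  omega


theorem pyBucketSet_four (l0 l1 l2 l3 : List Int) (j x : Int) (h1 : -4 ≤ j) (h2 : j ≤ 3) :
    pyBucketSet [l0, l1, l2, l3] j x =
      [if (if j < 0 then j + 4 else j) = 0 then l0 ++ [x] else l0,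
       if (if j < 0 then j + 4 else j) = 1 then l1 ++ [x] else l1,
       if (if j < 0 then j + 4 else j) = 2 then l2 ++ [x] else l2,
       if (if j < 0 then j + 4 else j) = 3 then l3 ++ [x] else l3] := by
  interval_cases j <;> simp [pyBucketSet]

theorem whileA_four (L0 L1 L2 L3 : List Int) :
    whileA [L0, L1, L2, L3] 0 0 4 =
      if 4 ≤ L0.length then ((L0.length : Int), 0)
      else if 4 ≤ L1.length then ((L1.length : Int), 1)
      else if 4 ≤ L2.length then ((L2.length : Int), 2)
      else if 4 ≤ L3.length then ((L3.length : Int), 3)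
      else (0, 4) := by
  have c : ∀ n : Nat, ((n:Int) ≥ 4) ↔ 4 ≤ n := by intro n; omega
  simp [whileA, c]

theorem bucket_nonneg (c : Int) (h1 : -4 ≤ pvSuit c) (h2 : pvSuit c ≤ 3) :
    0 ≤ pvBucket c ∧ pvBucket c ≤ 3 := by
  unfold pvBucket; split <;> omega

theorem bucket_congr (x y : Int) (h : pvSuit x = pvSuit y) : pvBucket x = pvBucket y := by
  unfold pvBucket; rw [h]

theorem D_iff (a b c d : Int) (rest : List Int)
    (ha : -4 ≤ pvSuit a ∧ pvSuit a ≤ 3) (hb : -4 ≤ pvSuit b ∧ pvSuit b ≤ 3)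
    (hc : -4 ≤ pvSuit c ∧ pvSuit c ≤ 3) (hd : -4 ≤ pvSuit d ∧ pvSuit d ≤ 3) :
    D_scoreFlushes (a :: b :: c :: d :: rest) ↔
      (pvBucket a = pvBucket b ∧ pvBucket a = pvBucket c ∧ pvBucket a = pvBucket d) ∧
      (¬ (pvSuit a = pvSuit b ∧ pvSuit a = pvSuit c ∧ pvSuit a = pvSuit d) ∨
       (pvSuit a < 0 ∧
        (pvSuit ((a :: b :: c :: d :: rest).getD ((a :: b :: c :: d :: rest).length - 1) 0)
           = pvSuit a ∨
         pvSuit ((a :: b :: c :: d :: rest).getD ((a :: b :: c :: d :: rest).length - 1) 0)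
           = pvSuit a + 4))) := by
  have htake : (a :: b :: c :: d :: rest).take 4 = [a, b, c, d] := rfl
  have hfa : ∀ p : Int → Prop, (∀ x ∈ [a, b, c, d], p x) ↔ (p a ∧ p b ∧ p c ∧ p d) := by
    intro p; simp
  have hex : ∀ p : Int → Prop, (∃ x ∈ [a, b, c, d], p x) ↔ (p a ∨ p b ∨ p c ∨ p d) := by
    intro p; simp
  unfold D_scoreFlushes
  rw [htake]
  simp only [hfa, hex, pvHasSuit_iff]
  set st := pvSuit ((a :: b :: c :: d :: rest).getD ((a :: b :: c :: d :: rest).length - 1) 0)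
    with hst
  constructor
  · rintro ⟨-, bk, hmem, ⟨hA, hB, hC, hD⟩, hcase⟩
    simp only [List.mem_cons, List.not_mem_nil, or_false] at hmem
    have hbb : 0 ≤ bk ∧ bk ≤ 3 := by rcases hmem with h | h | h | h <;> omega
    have bA := bucket_of_suit a bk hbb.1 hbb.2 hA
    have bB := bucket_of_suit b bk hbb.1 hbb.2 hB
    have bC := bucket_of_suit c bk hbb.1 hbb.2 hC
    have bD := bucket_of_suit d bk hbb.1 hbb.2 hD
    refine ⟨⟨bA.trans bB.symm, bA.trans bC.symm, bA.trans bD.symm⟩, ?_⟩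
    rcases hcase with ⟨hx, hy⟩ | ⟨⟨eA, eB, eC, eD⟩, hstc⟩
    · left
      rintro ⟨e1, e2, e3⟩
      rcases hx with h | h | h | h <;> rcases hy with g | g | g | g <;> omega
    · refine Or.inr ⟨by omega, ?_⟩
      rcases hstc with h | h
      · exact Or.inl (by omega)
      · exact Or.inr (by omega)
  · rintro ⟨⟨b1, b2, b3⟩, hrest⟩
    have h0 := bucket_nonneg a ha.1 ha.2
    have oA := hs_or a _ ha rfl
    have oB := hs_or b _ hb b1.symm
    have oC := hs_or c _ hc b2.symm
    have oD := hs_or d _ hd b3.symm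
    refine ⟨by simp, pvBucket a, by simp only [List.mem_cons, List.not_mem_nil, or_false]; omega,
      ⟨oA, oB, oC, oD⟩, ?_⟩
    rcases hrest with hne | ⟨hneg, hstc⟩
    · left
      constructor
      · rcases oA with h | h
        · exact Or.inl h
        · rcases oB with g | g
          · exact Or.inr (Or.inl g)
          · rcases oC with g2 | g2
            · exact Or.inr (Or.inr (Or.inl g2))
            · rcases oD with g3 | g3
              · exact Or.inr (Or.inr (Or.inr g3))
              · exact absurd ⟨by omega, by omega, by omega⟩ hne
      · rcases oA with h | h
        · rcases oB with g | g
          · rcases oC with g2 | g2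
            · rcases oD with g3 | g3
              · exact absurd ⟨by omega, by omega, by omega⟩ hne
              · exact Or.inr (Or.inr (Or.inr g3))
            · exact Or.inr (Or.inr (Or.inl g2))
          · exact Or.inr (Or.inl g)
        · exact Or.inl h
    · have hba : pvBucket a = pvSuit a + 4 := by unfold pvBucket; rw [if_pos hneg]
      rcases oB with gB | gB
      · exact Or.inl ⟨Or.inr (Or.inl gB), Or.inl (by omega)⟩
      · rcases oC with gC | gC
        · exact Or.inl ⟨Or.inr (Or.inr (Or.inl gC)), Or.inl (by omega)⟩
        · rcases oD with gD | gD
          · exact Or.inl ⟨Or.inr (Or.inr (Or.inr gD)), Or.inl (by omega)⟩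
          · refine Or.inr ⟨⟨by omega, by omega, by omega, by omega⟩, ?_⟩
            rcases hstc with h | h
            · exact Or.inl (by omega)
            · exact Or.inr (by omega)

theorem chainlen (k ba bb bc bd : Int) (ga gb gc gd : Int) :
    ((if bd = k then (if bc = k then (if bb = k then (if ba = k then [ga] else ([]:List Int)) ++ [gb] else (if ba = k then [ga] else ([]:List Int))) ++ [gc] else (if bb = k then (if ba = k then [ga] else ([]:List Int)) ++ [gb] else (if ba = k then [ga] else ([]:List Int)))) ++ [gd] else (if bc = k then (if bb = k then (if ba = k then [ga] else ([]:List Int)) ++ [gb] else (if ba = k then [ga] else ([]:List Int))) ++ [gc] else (if bb = k then (if ba = k then [ga] else ([]:List Int)) ++ [gb] else (if ba = k then [ga] else ([]:List Int)))))).length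
    = (if ba = k then 1 else 0) + (if bb = k then 1 else 0) +
      (if bc = k then 1 else 0) + (if bd = k then 1 else 0) := by
  split_ifs <;> simp

theorem ind4 (k ba bb bc bd : Int) :
    4 ≤ (if ba = k then 1 else 0) + (if bb = k then 1 else 0) +
        (if bc = k then 1 else 0) + (if bd = k then 1 else 0)
      ↔ (ba = k ∧ bb = k ∧ bc = k ∧ bd = k) := by
  split_ifs <;> simp_all

theorem ind1 (k ba : Int) (ga : Int) :
    (4 ≤ (if ba = k then [ga] else ([]:List Int)).length) ↔ False := by
  split_ifs <;> simp

theorem ind2 (k ba bb : Int) (ga gb : Int) :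
    (4 ≤ (if bb = k then (if ba = k then [ga] else ([]:List Int)) ++ [gb]
          else (if ba = k then [ga] else ([]:List Int))).length) ↔ False := by
  split_ifs <;> simp

theorem ind3 (k ba bb bc : Int) (ga gb gc : Int) :
    (4 ≤ (if bc = k then
            (if bb = k then (if ba = k then [ga] else ([]:List Int)) ++ [gb]
             else (if ba = k then [ga] else ([]:List Int))) ++ [gc]
          else
            (if bb = k then (if ba = k then [ga] else ([]:List Int)) ++ [gb]
             else (if ba = k then [ga] else ([]:List Int)))).length) ↔ False := by
  split_ifs <;> simp

theorem a_char (a b c d : Int) (rest : List Int)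
    (ha : -4 ≤ pvSuit a ∧ pvSuit a ≤ 3) (hb : -4 ≤ pvSuit b ∧ pvSuit b ≤ 3)
    (hc : -4 ≤ pvSuit c ∧ pvSuit c ≤ 3) (hd : -4 ≤ pvSuit d ∧ pvSuit d ≤ 3) :
    scoreFlushes (a :: b :: c :: d :: rest) =
      (if pvBucket a = pvBucket b ∧ pvBucket a = pvBucket c ∧ pvBucket a = pvBucket d
       then (if pvSuit ((PySem.List.pyGet? (a :: b :: c :: d :: rest) (-1)).getD 0) = pvBucket a
             then 5 else 4)
       else 0) := by
  have hsg : ∀ x : Int, getSuitNum x = pvSuit x := fun _ => rfl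
  have hbk : ∀ x : Int, (if getSuitNum x < 0 then getSuitNum x + 4 else getSuitNum x) = pvBucket x :=
    fun _ => rfl
  have hbk' : ∀ x : Int, (if pvSuit x < 0 then pvSuit x + 4 else pvSuit x) = pvBucket x :=
    fun _ => rfl
  unfold scoreFlushes
  simp only [List.nil_append, List.cons_append]
  have hs : PySem.List.slice (a :: b :: c :: d :: rest) none (some 4) = [a, b, c, d] := by
    rw [PySem.List.slice_to _ (by norm_num : (0:Int) ≤ 4)]
    show List.take 4 _ = _
    simp [List.take_succ_cons]
  rw [hs]
  simp only [List.foldl_cons, List.foldl_nil, hsg]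
  rw [pyBucketSet_four _ _ _ _ _ _ ha.1 ha.2, pyBucketSet_four _ _ _ _ _ _ hb.1 hb.2,
      pyBucketSet_four _ _ _ _ _ _ hc.1 hc.2, pyBucketSet_four _ _ _ _ _ _ hd.1 hd.2]
  simp only [hbk']
  rw [whileA_four]
  set t := (PySem.List.pyGet? (a :: b :: c :: d :: rest) (-1)).getD 0 with hT
  simp only [List.nil_append]
  simp only [chainlen, ind4]
  by_cases h1 : pvBucket a = pvBucket b
  · by_cases h2 : pvBucket a = pvBucket c
    · by_cases h3 : pvBucket a = pvBucket d
      · rw [← h1, ← h2, ← h3]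
        have hr := bucket_nonneg a ha.1 ha.2
        have hcs : pvBucket a = 0 ∨ pvBucket a = 1 ∨ pvBucket a = 2 ∨ pvBucket a = 3 := by omega
        rcases hcs with h | h | h | h <;> rw [h] <;> norm_num
      · have hk : ∀ k : Int, ¬(pvBucket a = k ∧ pvBucket b = k ∧ pvBucket c = k ∧ pvBucket d = k) :=
          fun k hkk => h3 (hkk.1.trans hkk.2.2.2.symm)
        simp [hk, h3]
    · have hk : ∀ k : Int, ¬(pvBucket a = k ∧ pvBucket b = k ∧ pvBucket c = k ∧ pvBucket d = k) :=
        fun k hkk => h2 (hkk.1.trans hkk.2.2.1.symm)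
      simp [hk, h2]
  · have hk : ∀ k : Int, ¬(pvBucket a = k ∧ pvBucket b = k ∧ pvBucket c = k ∧ pvBucket d = k) :=
      fun k hkk => h1 (hkk.1.trans hkk.2.1.symm)
    simp [hk, h1]

theorem a_char1 (a : Int) (ha : -4 ≤ pvSuit a ∧ pvSuit a ≤ 3) : scoreFlushes [a] = 0 := by
  have hsg : ∀ x : Int, getSuitNum x = pvSuit x := fun _ => rfl
  have hbk' : ∀ x : Int, (if pvSuit x < 0 then pvSuit x + 4 else pvSuit x) = pvBucket x :=
    fun _ => rfl
  unfold scoreFlushes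
  simp only [List.nil_append, List.cons_append]
  have hs : PySem.List.slice [a] none (some 4) = [a] := by
    rw [PySem.List.slice_to _ (by norm_num : (0:Int) ≤ 4)]
    show List.take 4 _ = _
    simp
  rw [hs]
  simp only [List.foldl_cons, List.foldl_nil, hsg]
  rw [pyBucketSet_four _ _ _ _ _ _ ha.1 ha.2]
  simp only [hbk']
  rw [whileA_four]
  simp only [List.nil_append, ind1]
  simp

theorem a_char2 (a b : Int) (ha : -4 ≤ pvSuit a ∧ pvSuit a ≤ 3)
    (hb : -4 ≤ pvSuit b ∧ pvSuit b ≤ 3) : scoreFlushes [a, b] = 0 := by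
  have hsg : ∀ x : Int, getSuitNum x = pvSuit x := fun _ => rfl
  have hbk' : ∀ x : Int, (if pvSuit x < 0 then pvSuit x + 4 else pvSuit x) = pvBucket x :=
    fun _ => rfl
  unfold scoreFlushes
  simp only [List.nil_append, List.cons_append]
  have hs : PySem.List.slice [a, b] none (some 4) = [a, b] := by
    rw [PySem.List.slice_to _ (by norm_num : (0:Int) ≤ 4)]
    show List.take 4 _ = _
    simp
  rw [hs]
  simp only [List.foldl_cons, List.foldl_nil, hsg]
  rw [pyBucketSet_four _ _ _ _ _ _ ha.1 ha.2, pyBucketSet_four _ _ _ _ _ _ hb.1 hb.2]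
  simp only [hbk']
  rw [whileA_four]
  simp only [List.nil_append, ind2]
  simp

theorem a_char3 (a b c : Int) (ha : -4 ≤ pvSuit a ∧ pvSuit a ≤ 3)
    (hb : -4 ≤ pvSuit b ∧ pvSuit b ≤ 3) (hc : -4 ≤ pvSuit c ∧ pvSuit c ≤ 3) :
    scoreFlushes [a, b, c] = 0 := by
  have hsg : ∀ x : Int, getSuitNum x = pvSuit x := fun _ => rfl
  have hbk' : ∀ x : Int, (if pvSuit x < 0 then pvSuit x + 4 else pvSuit x) = pvBucket x :=
    fun _ => rfl
  unfold scoreFlushes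
  simp only [List.nil_append, List.cons_append]
  have hs : PySem.List.slice [a, b, c] none (some 4) = [a, b, c] := by
    rw [PySem.List.slice_to _ (by norm_num : (0:Int) ≤ 4)]
    show List.take 4 _ = _
    simp
  rw [hs]
  simp only [List.foldl_cons, List.foldl_nil, hsg]
  rw [pyBucketSet_four _ _ _ _ _ _ ha.1 ha.2, pyBucketSet_four _ _ _ _ _ _ hb.1 hb.2,
      pyBucketSet_four _ _ _ _ _ _ hc.1 hc.2]
  simp only [hbk']
  rw [whileA_four]
  simp only [List.nil_append, ind3]
  simp

theorem b_char (a b c d : Int) (rest : List Int) :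
    scoreFlushes_alt (a :: b :: c :: d :: rest) =
      (if pvSuit a = pvSuit b ∧ pvSuit a = pvSuit c ∧ pvSuit a = pvSuit d
       then (if pvSuit ((PySem.List.pyGet? (a :: b :: c :: d :: rest) (-1)).getD 0) = pvSuit a
             then 5 else 4)
       else 0) := by
  have hsg : ∀ x : Int, getSuitNum x = pvSuit x := fun _ => rfl
  unfold scoreFlushes_alt
  have hs : PySem.List.slice (a :: b :: c :: d :: rest) none (some 4) = [a, b, c, d] := by
    rw [PySem.List.slice_to _ (by norm_num : (0:Int) ≤ 4)]
    show List.take 4 _ = _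
    simp [List.take_succ_cons]
  rw [hs]
  simp only [List.map_cons, List.map_nil, hsg, List.length_cons, List.length_nil]
  by_cases h1 : pvSuit a = pvSuit b
  · by_cases h2 : pvSuit a = pvSuit c
    · by_cases h3 : pvSuit a = pvSuit d
      · rw [← h1, ← h2, ← h3]
        simp [PySem.Set.ofList, PySem.Set.add, PySem.Set.contains]
      · have hne : (PySem.Set.ofList [pvSuit a, pvSuit b, pvSuit c, pvSuit d]).length ≠ 1 := by
          intro hlen
          obtain ⟨y, hy⟩ := List.length_eq_one_iff.1 hlen
          have m1 : pvSuit a ∈ PySem.Set.ofList [pvSuit a, pvSuit b, pvSuit c, pvSuit d] :=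
            (PySem.Set.mem_ofList _ _).2 (by simp)
          have m2 : pvSuit d ∈ PySem.Set.ofList [pvSuit a, pvSuit b, pvSuit c, pvSuit d] :=
            (PySem.Set.mem_ofList _ _).2 (by simp)
          rw [hy] at m1 m2
          simp at m1 m2
          exact h3 (m1.trans m2.symm)
        simp [hne, h3]
    · have hne : (PySem.Set.ofList [pvSuit a, pvSuit b, pvSuit c, pvSuit d]).length ≠ 1 := by
        intro hlen
        obtain ⟨y, hy⟩ := List.length_eq_one_iff.1 hlen
        have m1 : pvSuit a ∈ PySem.Set.ofList [pvSuit a, pvSuit b, pvSuit c, pvSuit d] :=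
          (PySem.Set.mem_ofList _ _).2 (by simp)
        have m2 : pvSuit c ∈ PySem.Set.ofList [pvSuit a, pvSuit b, pvSuit c, pvSuit d] :=
          (PySem.Set.mem_ofList _ _).2 (by simp)
        rw [hy] at m1 m2
        simp at m1 m2
        exact h2 (m1.trans m2.symm)
      simp [hne, h2]
  · have hne : (PySem.Set.ofList [pvSuit a, pvSuit b, pvSuit c, pvSuit d]).length ≠ 1 := by
      intro hlen
      obtain ⟨y, hy⟩ := List.length_eq_one_iff.1 hlen
      have m1 : pvSuit a ∈ PySem.Set.ofList [pvSuit a, pvSuit b, pvSuit c, pvSuit d] :=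
        (PySem.Set.mem_ofList _ _).2 (by simp)
      have m2 : pvSuit b ∈ PySem.Set.ofList [pvSuit a, pvSuit b, pvSuit c, pvSuit d] :=
        (PySem.Set.mem_ofList _ _).2 (by simp)
      rw [hy] at m1 m2
      simp at m1 m2
      exact h1 (m1.trans m2.symm)
    simp [hne, h1]

theorem b_short (hand : List Int) (h : hand.length < 4) : scoreFlushes_alt hand = 0 := by
  unfold scoreFlushes_alt
  rw [PySem.List.slice_to _ (by norm_num : (0:Int) ≤ 4)]
  rw [if_neg]
  intro hcontra
  have h4 := hcontra.1
  simp [List.length_take] at h4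
  omega

theorem cut_eq (hand : List Int) (_h : hand ≠ []) :
    (PySem.List.pyGet? hand (-1)).getD 0 = hand.getD (hand.length - 1) 0 := by
  rw [PySem.List.pyGet?_neg_one, List.getLast?_eq_getElem?]
  simp [List.getD]

theorem unchanged_main (hand : List Int) (hpre : Pre_scoreFlushes hand) (hnd : ¬ D_scoreFlushes hand) :
    scoreFlushes hand = scoreFlushes_alt hand := by
  obtain ⟨hne, hr⟩ := hpre
  match hand with
  | [] => exact absurd rfl hne
  | [a] =>
    rw [a_char1 a (pre_range a (hr a (by simp))), b_short _ (by simp)]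
  | [a, b] =>
    rw [a_char2 a b (pre_range a (hr a (by simp))) (pre_range b (hr b (by simp))),
        b_short _ (by simp)]
  | [a, b, c] =>
    rw [a_char3 a b c (pre_range a (hr a (by simp))) (pre_range b (hr b (by simp)))
          (pre_range c (hr c (by simp))), b_short _ (by simp)]
  | a :: b :: c :: d :: rest =>
    have Ra := pre_range a (hr a (by simp))
    have Rb := pre_range b (hr b (by simp))
    have Rc := pre_range c (hr c (by simp))
    have Rd := pre_range d (hr d (by simp))
    rw [a_char a b c d rest Ra Rb Rc Rd, b_char a b c d rest]
    rw [cut_eq (a :: b :: c :: d :: rest) (by simp)]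
    rw [D_iff a b c d rest Ra Rb Rc Rd] at hnd
    set t := (a :: b :: c :: d :: rest).getD ((a :: b :: c :: d :: rest).length - 1) 0 with hT
    by_cases hp : pvSuit a = pvSuit b ∧ pvSuit a = pvSuit c ∧ pvSuit a = pvSuit d
    · have hpb : pvBucket a = pvBucket b ∧ pvBucket a = pvBucket c ∧ pvBucket a = pvBucket d :=
        ⟨bucket_congr _ _ hp.1, bucket_congr _ _ hp.2.1, bucket_congr _ _ hp.2.2⟩
      rw [if_pos hpb, if_pos hp]
      have hno : ¬ (pvSuit a < 0 ∧ (pvSuit t = pvSuit a ∨ pvSuit t = pvSuit a + 4)) :=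
        fun hx => hnd ⟨hpb, Or.inr hx⟩
      have hβ : pvBucket a = if pvSuit a < 0 then pvSuit a + 4 else pvSuit a := rfl
      by_cases hneg : pvSuit a < 0
      · have h1 : pvSuit t ≠ pvSuit a := fun h => hno ⟨hneg, Or.inl h⟩
        have h2 : pvSuit t ≠ pvSuit a + 4 := fun h => hno ⟨hneg, Or.inr h⟩
        rw [hβ, if_pos hneg, if_neg h2, if_neg h1]
      · rw [hβ, if_neg hneg]
    · rw [if_neg hp]
      by_cases hb : pvBucket a = pvBucket b ∧ pvBucket a = pvBucket c ∧ pvBucket a = pvBucket d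
      · exact absurd ⟨hb, Or.inl hp⟩ hnd
      · rw [if_neg hb]

theorem tight_main (hand : List Int) (hpre : Pre_scoreFlushes hand) (hd : D_scoreFlushes hand) :
    scoreFlushes hand ≠ scoreFlushes_alt hand := by
  obtain ⟨hne, hr⟩ := hpre
  match hand with
  | [] => exact absurd rfl hne
  | [a] => exact absurd hd.1 (by simp)
  | [a, b] => exact absurd hd.1 (by simp)
  | [a, b, c] => exact absurd hd.1 (by simp)
  | a :: b :: c :: d :: rest =>
    have Ra := pre_range a (hr a (by simp))
    have Rb := pre_range b (hr b (by simp))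
    have Rc := pre_range c (hr c (by simp))
    have Rd := pre_range d (hr d (by simp))
    rw [a_char a b c d rest Ra Rb Rc Rd, b_char a b c d rest]
    rw [cut_eq (a :: b :: c :: d :: rest) (by simp)]
    rw [D_iff a b c d rest Ra Rb Rc Rd] at hd
    set t := (a :: b :: c :: d :: rest).getD ((a :: b :: c :: d :: rest).length - 1) 0 with hT
    obtain ⟨hb, hrest⟩ := hd
    rw [if_pos hb]
    rcases hrest with hp | ⟨hneg, hst⟩
    · rw [if_neg hp]
      split <;> omega
    · have hβ : pvBucket a = pvSuit a + 4 := by unfold pvBucket; rw [if_pos hneg]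
      by_cases hp : pvSuit a = pvSuit b ∧ pvSuit a = pvSuit c ∧ pvSuit a = pvSuit d
      · rw [if_pos hp, hβ]
        rcases hst with h1 | h1
        · rw [if_pos h1, if_neg (by omega : ¬ pvSuit t = pvSuit a + 4)]; omega
        · rw [if_pos h1, if_neg (by omega : ¬ pvSuit t = pvSuit a)]; omega
      · rw [if_neg hp]
        split <;> omega

-- ===== VERDICT (by name: the statement is the Claim_ definition above) =====
theorem scoreFlushes_spec : Claim_unchanged_scoreFlushes := by
  intro hand _ hpre
  unfold Spec_scoreFlushes
  intro hnd
  exact (unchanged_main hand hpre hnd).symm ▸ rfl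

theorem scoreFlushes_changed : Claim_changed_scoreFlushes := by
  unfold Claim_changed_scoreFlushes; decide

theorem scoreFlushes_tight : Claim_exact_scoreFlushes := by
  intro hand _ hpre hd
  exact tight_main hand hpre hd
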